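-- pv_equiv track=rewrite | github.com/ifarshgar/Encryption-Techniques | Hash function/Hash.py | convert_msg_to_blocks_of_8bit_array
-- ===== SOURCE A (Python) =====
-- def decimalToBinary(decimal):
--     binary = []
--     while(decimal > 0):
--         binary.append(decimal%2)
--         decimal = decimal // 2
--     while(len(binary) < 4):
--         binary.append(0)
--     binary.reverse()
--     return binary
--
-- def convert_msg_to_blocks_of_8bit_array(msg, nBytes):
--     M = []
--
--     for m in msg:
--         tmp = []
--         tmp.extend(decimalToBinary(ord(m)))
--         while len(tmp) < 8:
--             tmp.insert(0,0)
--         M.extend(tmp)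
--
--     while len(M) < nBytes*8:
--         M.insert(0,0)
--
--     return M
-- ===== SOURCE B (Python) =====
-- def convert_msg_to_blocks_of_8bit_array(msg, nBytes):
--     M = [int(b) for m in msg for b in format(ord(m), '08b')]
--     return [0] * max(0, nBytes * 8 - len(M)) + M
-- ===== Notes on version B (the rewrite author's own statement) =====
-- stated objective: simpler
-- what changed: Replaces the repeated-division decimalToBinary helper and the two while-insert(0,0) padding loops with one flat comprehension over format(ord(m),'08b') and a single computed zero prefix.
import Mathlib
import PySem

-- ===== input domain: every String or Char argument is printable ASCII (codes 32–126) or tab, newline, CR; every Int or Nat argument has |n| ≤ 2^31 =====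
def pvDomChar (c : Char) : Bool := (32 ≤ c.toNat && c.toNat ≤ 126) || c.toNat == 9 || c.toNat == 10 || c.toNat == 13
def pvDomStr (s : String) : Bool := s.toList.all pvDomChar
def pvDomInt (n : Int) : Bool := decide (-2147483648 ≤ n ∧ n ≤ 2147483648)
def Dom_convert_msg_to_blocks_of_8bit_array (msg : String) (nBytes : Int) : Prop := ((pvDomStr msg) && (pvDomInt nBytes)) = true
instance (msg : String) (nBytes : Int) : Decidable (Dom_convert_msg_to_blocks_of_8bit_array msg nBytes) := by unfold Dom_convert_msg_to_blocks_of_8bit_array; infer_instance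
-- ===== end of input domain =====

-- B replaces the repeated-division helper and the two while-insert(0,0) loops with a flat
-- comprehension over format(ord(m),'08b') and one computed zero prefix (objective: simpler).

-- ===== PORT A =====
-- 'while decimal > 0: binary.append(decimal%2); decimal = decimal // 2'
def pvD2BLoop (decimal : Int) (binary : List Int) : List Int :=
  if hgt : decimal > 0 then
    pvD2BLoop (PySem.Int.floordiv decimal 2) (binary ++ [PySem.Int.mod decimal 2])
  else binary
termination_by decimal.toNat
decreasing_by
  have := PySem.Int.floordiv_eq_ediv_of_pos (a := decimal) (b := 2) (by omega)
  rw [this]; omega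

-- 'while len(binary) < 4: binary.append(0)'
def pvPad4 (binary : List Int) : List Int :=
  if binary.length < 4 then pvPad4 (binary ++ [0]) else binary
termination_by 4 - binary.length
decreasing_by simp; omega

def decimalToBinary (decimal : Int) : List Int :=
  (pvPad4 (pvD2BLoop decimal [])).reverse

-- 'while len(tmp) < 8: tmp.insert(0,0)'
def pvPad8 (tmp : List Int) : List Int :=
  if tmp.length < 8 then pvPad8 ((0 : Int) :: tmp) else tmp
termination_by 8 - tmp.length
decreasing_by simp; omega

-- 'while len(M) < nBytes*8: M.insert(0,0)'
def pvPadM (M : List Int) (target : Int) : List Int :=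
  if hlt : (M.length : Int) < target then pvPadM ((0 : Int) :: M) target else M
termination_by (target - M.length).toNat
decreasing_by simp; omega

def convert_msg_to_blocks_of_8bit_array (msg : String) (nBytes : Int) : List Int :=
  let M := msg.toList.foldl
    (fun M m => M ++ pvPad8 (([] : List Int) ++ decimalToBinary (m.toNat : Int))) []
  pvPadM M (nBytes * 8)

-- ===== PORT B =====
-- binary digits of n, MSB first ('{:b}'.format), empty for 0
def pvBits (n : Nat) : List Int :=
  if n = 0 then [] else pvBits (n / 2) ++ [((n % 2 : Nat) : Int)]

-- format(n, '08b') as a list of 0/1 ints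
def pvFmt08b (n : Nat) : List Int :=
  let bits := if n = 0 then [(0 : Int)] else pvBits n
  List.replicate (8 - bits.length) 0 ++ bits

def convert_msg_to_blocks_of_8bit_array_alt (msg : String) (nBytes : Int) : List Int :=
  let M := msg.toList.flatMap (fun m => pvFmt08b m.toNat)
  List.replicate (max 0 (nBytes * 8 - M.length)).toNat 0 ++ M

-- ===== PRECONDITION & SPEC =====
def Spec_convert_msg_to_blocks_of_8bit_array (msg : String) (nBytes : Int) (out : List Int) : Prop := out = convert_msg_to_blocks_of_8bit_array_alt msg nBytes
instance (msg : String) (nBytes : Int) (out : List Int) : Decidable (Spec_convert_msg_to_blocks_of_8bit_array msg nBytes out) := by unfold Spec_convert_msg_to_blocks_of_8bit_array; infer_instance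

-- ===== CLAIM (what is proved, stated in full; the proofs are below) =====
def Claim_equal_convert_msg_to_blocks_of_8bit_array : Prop := ∀ (msg : String) (nBytes : Int), Dom_convert_msg_to_blocks_of_8bit_array msg nBytes → Spec_convert_msg_to_blocks_of_8bit_array msg nBytes (convert_msg_to_blocks_of_8bit_array msg nBytes)

-- ===== LEMMAS AND PROOFS =====

-- helper for the proofs: LSB-first binary digits of a Nat
def pvNatLsb (n : Nat) : List Int :=
  if n = 0 then [] else ((n % 2 : Nat) : Int) :: pvNatLsb (n / 2)

lemma d2bLoop_eq (n : Nat) : ∀ acc : List Int, pvD2BLoop (n : Int) acc = acc ++ pvNatLsb n := by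
  induction n using Nat.strong_induction_on with
  | _ n ih =>
    intro acc
    rw [pvD2BLoop, pvNatLsb]
    by_cases h : n = 0
    · simp [h]
    · have hpos : ((n : Int) > 0) := by omega
      rw [dif_pos hpos, if_neg h]
      rw [show PySem.Int.floordiv (n : Int) 2 = ((n / 2 : Nat) : Int) from
            by exact_mod_cast PySem.Int.floordiv_natCast n 2,
          show PySem.Int.mod (n : Int) 2 = ((n % 2 : Nat) : Int) from
            by exact_mod_cast PySem.Int.mod_natCast n 2]
      rw [ih (n / 2) (by omega)]
      simp

lemma bits_eq_reverse (n : Nat) : pvBits n = (pvNatLsb n).reverse := by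
  induction n using Nat.strong_induction_on with
  | _ n ih =>
    rw [pvBits, pvNatLsb]
    by_cases h : n = 0
    · simp [h]
    · rw [if_neg h, if_neg h, ih (n / 2) (by omega)]
      simp

lemma pad4_eq (b : List Int) : pvPad4 b = b ++ List.replicate (4 - b.length) 0 := by
  fun_induction pvPad4 b with
  | case1 b h ih =>
    rw [ih]
    have : 4 - b.length = (4 - (b ++ [0]).length) + 1 := by simp; omega
    rw [this, List.append_assoc]
    simp [List.replicate_succ]
  | case2 b h =>
    have : 4 - b.length = 0 := by omega
    simp [this]

lemma pad8_eq (t : List Int) : pvPad8 t = List.replicate (8 - t.length) 0 ++ t := by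
  fun_induction pvPad8 t with
  | case1 t h ih =>
    rw [ih]
    have : 8 - t.length = (8 - ((0 : Int) :: t).length) + 1 := by simp; omega
    rw [this, List.replicate_succ', List.append_assoc]
    simp
  | case2 t h =>
    have : 8 - t.length = 0 := by omega
    simp [this]

-- per-character equality (holds for every code point)
lemma perChar (c : Char) :
    pvPad8 (([] : List Int) ++ decimalToBinary ((c.toNat : Nat) : Int)) = pvFmt08b c.toNat := by
  set n := c.toNat with hn
  unfold decimalToBinary pvFmt08b
  rw [d2bLoop_eq n [], List.nil_append, pad4_eq, List.nil_append, List.reverse_append,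
    List.reverse_replicate, ← bits_eq_reverse, pad8_eq]
  by_cases h : n = 0
  · have hb : pvBits 0 = [] := by rw [pvBits]; simp
    have hl : pvNatLsb 0 = [] := by rw [pvNatLsb]; simp
    simp only [h, hb, hl]
    simp
  · rw [if_neg h]
    have hlen : (pvBits n).length = (pvNatLsb n).length := by
      rw [bits_eq_reverse]; simp
    simp only [List.length_append, List.length_replicate, ← List.append_assoc,
      ← List.replicate_add, hlen]
    congr 2
    omega

lemma fold_eq_flatMap (l : List Char) (acc : List Int) :
    l.foldl (fun M m => M ++ pvPad8 (([] : List Int) ++ decimalToBinary ((m.toNat : Nat) : Int))) acc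
      = acc ++ l.flatMap (fun m => pvFmt08b m.toNat) := by
  induction l generalizing acc with
  | nil => simp
  | cons c t ih =>
    simp only [List.foldl_cons, List.flatMap_cons, perChar c, ih, List.append_assoc]

lemma padM_eq (M : List Int) (target : Int) :
    pvPadM M target = List.replicate (max 0 (target - M.length)).toNat 0 ++ M := by
  fun_induction pvPadM M target with
  | case1 M h ih =>
    rw [ih]
    have h1 : (max 0 (target - M.length)).toNat
        = (max 0 (target - ((0 : Int) :: M).length)).toNat + 1 := by
      simp; omega
    rw [h1, List.replicate_succ', List.append_assoc]
    simp
  | case2 M h =>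
    have : (max 0 (target - M.length)).toNat = 0 := by omega
    simp [this]

-- ===== VERDICT (by name: the statement is the Claim_ definition above) =====
theorem convert_msg_to_blocks_of_8bit_array_spec : Claim_equal_convert_msg_to_blocks_of_8bit_array := by
  intro msg nBytes _hdom
  unfold Spec_convert_msg_to_blocks_of_8bit_array
  unfold convert_msg_to_blocks_of_8bit_array convert_msg_to_blocks_of_8bit_array_alt
  simp only
  rw [fold_eq_flatMap msg.toList [], List.nil_append, padM_eq]
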